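-- pv_equiv track=rewrite | github.com/BigwigMediaAI/critiquee_Dev | backend/utils/sentiment.py | compute_sentiment
-- ===== SOURCE A (Python) =====
-- POSITIVE_KEYWORDS = {
--     'amazing', 'excellent', 'wonderful', 'great', 'fantastic', 'perfect',
--     'outstanding', 'love', 'loved', 'best', 'beautiful', 'comfortable',
--     'friendly', 'helpful', 'recommend', 'enjoyed', 'pleased', 'satisfied',
--     'impressive', 'superb', 'delightful', 'clean', 'spacious', 'cozy',
--     'warm', 'professional', 'exceptional', 'magnificent', 'stunning',
--     'incredible', 'gorgeous', 'brilliant', 'fabulous', 'splendid',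
--     'terrific', 'awesome', 'pleasant', 'nice', 'good', 'happy', 'glad',
--     'thankful', 'grateful', 'polite', 'attentive', 'efficient', 'immaculate',
--     'spotless', 'luxurious', 'premium', 'top', 'superb', 'flawless',
--     'perfect', 'charming', 'welcoming', 'hospitable', 'responsive',
--     'above', 'exceeded', 'exceeded expectations', 'highly recommend',
--     'five stars', '5 stars', 'will return', 'will definitely', 'worth',
--     'value', 'reasonable', 'affordable', 'budget', 'bargain',
-- }
--
-- NEGATIVE_KEYWORDS = {
--     'terrible', 'awful', 'horrible', 'bad', 'worst', 'disgusting',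
--     'disappointing', 'disappointed', 'poor', 'mediocre', 'dirty',
--     'rude', 'slow', 'unhelpful', 'broken', 'noisy', 'smelly',
--     'uncomfortable', 'frustrated', 'frustrating', 'angry', 'overpriced',
--     'unacceptable', 'ignored', 'waste', 'filthy', 'unprofessional',
--     'careless', 'negligent', 'unclean', 'subpar', 'dreadful',
--     'appalling', 'atrocious', 'shocking', 'miserable', 'unpleasant',
--     'annoying', 'useless', 'incompetent', 'lazy', 'hostile', 'cold',
--     'cramped', 'dated', 'old', 'stained', 'broken', 'moldy',
--     'cockroach', 'bug', 'insect', 'pest', 'leak', 'flooded',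
--     'never again', 'avoid', 'scam', 'rip off', 'ripoff', 'cheated',
--     'lied', 'false', 'misleading', 'not worth', 'regret', 'wasted',
--     'below average', 'below expectations', 'not recommended',
--     'not recommend', 'do not stay', 'stay away',
-- }
--
-- NEUTRAL_KEYWORDS = {
--     'okay', 'fine', 'average', 'decent', 'acceptable', 'standard',
--     'normal', 'expected', 'alright', 'moderate', 'adequate', 'fair',
--     'nothing special', 'as expected', 'typical', 'basic', 'so-so',
-- }
--
-- def compute_sentiment(text: str, rating: int = None) -> str:
--     """
--     Compute sentiment label from review text and optional star rating.
--     Returns one of: 'positive', 'negative', 'neutral', 'mixed'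
--     """
--     if not text:
--         # Fall back to rating only
--         if rating is not None:
--             if rating >= 4:
--                 return 'positive'
--             elif rating <= 2:
--                 return 'negative'
--         return 'neutral'
--
--     words = text.lower()
--
--     # Check multi-word phrases first
--     pos_score = sum(1 for kw in POSITIVE_KEYWORDS if kw in words)
--     neg_score = sum(1 for kw in NEGATIVE_KEYWORDS if kw in words)
--
--     # Apply star rating bias (weighted 1.5x keyword match)
--     if rating is not None:
--         if rating >= 4:
--             pos_score += 2
--         elif rating == 3:
--             pass  # neutral, no bias
--         elif rating <= 2:
--             neg_score += 2
--
--     # Determine sentiment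
--     if pos_score == 0 and neg_score == 0:
--         # No clear signals - use neutral keywords or rating
--         neutral_count = sum(1 for kw in NEUTRAL_KEYWORDS if kw in words)
--         if neutral_count > 0:
--             return 'neutral'
--         if rating is not None:
--             if rating >= 4:
--                 return 'positive'
--             elif rating <= 2:
--                 return 'negative'
--         return 'neutral'
--
--     # Mixed: meaningful signals on both sides
--     if pos_score >= 2 and neg_score >= 1:
--         return 'mixed'
--     if neg_score >= 2 and pos_score >= 1:
--         return 'mixed'
--
--     if pos_score > neg_score:
--         return 'positive'
--     elif neg_score > pos_score:
--         return 'negative'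
--     else:
--         return 'mixed'
-- ===== SOURCE B (Python) =====
-- # B: position-driven scan — walk the lowered text once and, at each index, try only the
-- # keywords whose first character matches there (a precomputed first-char bucket index),
-- # collecting hits into matched sets; A instead runs a substring test per keyword.
-- POSITIVE_KEYWORDS = ('amazing', 'excellent', 'wonderful', 'great', 'fantastic', 'perfect', 'outstanding', 'love', 'loved', 'best', 'beautiful', 'comfortable', 'friendly', 'helpful', 'recommend', 'enjoyed', 'pleased', 'satisfied', 'impressive', 'superb', 'delightful', 'clean', 'spacious', 'cozy', 'warm', 'professional', 'exceptional', 'magnificent', 'stunning', 'incredible', 'gorgeous', 'brilliant', 'fabulous', 'splendid', 'terrific', 'awesome', 'pleasant', 'nice', 'good', 'happy', 'glad', 'thankful', 'grateful', 'polite', 'attentive', 'efficient', 'immaculate', 'spotless', 'luxurious', 'premium', 'top', 'flawless', 'charming', 'welcoming', 'hospitable', 'responsive', 'above', 'exceeded', 'exceeded expectations', 'highly recommend', 'five stars', '5 stars', 'will return', 'will definitely', 'worth', 'value', 'reasonable', 'affordable', 'budget', 'bargain')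
--
-- NEGATIVE_KEYWORDS = ('terrible', 'awful', 'horrible', 'bad', 'worst', 'disgusting', 'disappointing', 'disappointed', 'poor', 'mediocre', 'dirty', 'rude', 'slow', 'unhelpful', 'broken', 'noisy', 'smelly', 'uncomfortable', 'frustrated', 'frustrating', 'angry', 'overpriced', 'unacceptable', 'ignored', 'waste', 'filthy', 'unprofessional', 'careless', 'negligent', 'unclean', 'subpar', 'dreadful', 'appalling', 'atrocious', 'shocking', 'miserable', 'unpleasant', 'annoying', 'useless', 'incompetent', 'lazy', 'hostile', 'cold', 'cramped', 'dated', 'old', 'stained', 'moldy', 'cockroach', 'bug', 'insect', 'pest', 'leak', 'flooded', 'never again', 'avoid', 'scam', 'rip off', 'ripoff', 'cheated', 'lied', 'false', 'misleading', 'not worth', 'regret', 'wasted', 'below average', 'below expectations', 'not recommended', 'not recommend', 'do not stay', 'stay away')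
--
-- NEUTRAL_KEYWORDS = ('okay', 'fine', 'average', 'decent', 'acceptable', 'standard', 'normal', 'expected', 'alright', 'moderate', 'adequate', 'fair', 'nothing special', 'as expected', 'typical', 'basic', 'so-so')
--
--
-- def _by_first(kws):
--     buckets = {}
--     for kw in kws:
--         buckets.setdefault(kw[0], []).append(kw)
--     return buckets
--
--
-- _POS_BUCKETS = _by_first(POSITIVE_KEYWORDS)
-- _NEG_BUCKETS = _by_first(NEGATIVE_KEYWORDS)
-- _NEU_BUCKETS = _by_first(NEUTRAL_KEYWORDS)
-- _EMPTY = ()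
--
--
-- def compute_sentiment(text: str, rating: int = None) -> str:
--     if not text:
--         if rating is not None:
--             if rating >= 4:
--                 return 'positive'
--             if rating <= 2:
--                 return 'negative'
--         return 'neutral'
--
--     words = text.lower()
--     pos, neg, neu = set(), set(), set()
--     for i in range(len(words)):
--         c = words[i]
--         for kw in _POS_BUCKETS.get(c, _EMPTY):
--             if words.startswith(kw, i):
--                 pos.add(kw)
--         for kw in _NEG_BUCKETS.get(c, _EMPTY):
--             if words.startswith(kw, i):
--                 neg.add(kw)
--         for kw in _NEU_BUCKETS.get(c, _EMPTY):
--             if words.startswith(kw, i):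
--                 neu.add(kw)
--
--     p, q = len(pos), len(neg)
--     if rating is not None:
--         if rating >= 4:
--             p += 2
--         elif rating <= 2:
--             q += 2
--
--     if p == 0 and q == 0:
--         if neu:
--             return 'neutral'
--         if rating is not None:
--             if rating >= 4:
--                 return 'positive'
--             if rating <= 2:
--                 return 'negative'
--         return 'neutral'
--
--     if (p >= 2 and q >= 1) or (q >= 2 and p >= 1):
--         return 'mixed'
--     if p > q:
--         return 'positive'
--     if q > p:
--         return 'negative'
--     return 'mixed'
-- ===== Notes on version B (the rewrite author's own statement) =====
-- stated objective: alternative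
-- what changed: B replaces A's per-keyword substring tests (one 'kw in text' scan for each of the ~160 keywords) by a single position-driven pass over the lowered text that, at each index, tries only the keywords whose first character matches there (a precomputed first-character bucket index) and collects the hits into matched sets, reading the scores off the set sizes.
import Mathlib
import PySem

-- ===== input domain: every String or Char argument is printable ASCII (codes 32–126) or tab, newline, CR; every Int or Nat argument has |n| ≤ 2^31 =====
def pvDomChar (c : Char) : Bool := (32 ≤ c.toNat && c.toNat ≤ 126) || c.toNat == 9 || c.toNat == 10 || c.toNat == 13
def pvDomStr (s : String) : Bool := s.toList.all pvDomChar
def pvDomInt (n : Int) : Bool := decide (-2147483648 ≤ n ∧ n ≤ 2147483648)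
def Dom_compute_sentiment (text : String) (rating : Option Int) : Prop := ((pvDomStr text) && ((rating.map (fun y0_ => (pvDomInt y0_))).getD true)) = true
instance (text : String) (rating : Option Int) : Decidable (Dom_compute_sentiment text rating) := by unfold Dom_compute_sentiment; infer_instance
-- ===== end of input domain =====

-- B re-counts keyword hits by a single position-driven scan of the lowered text (looking up, at
-- each index, only the keywords whose first character matches, via a precomputed bucket index, and
-- collecting the hits into matched sets) instead of A's per-keyword substring tests;
-- objective: alternative (same result, different traversal), not claimed faster.

-- ===== PORT A =====
def pvPosKw : List String := ["amazing", "excellent", "wonderful", "great", "fantastic", "perfect", "outstanding", "love", "loved", "best", "beautiful", "comfortable", "friendly", "helpful", "recommend", "enjoyed", "pleased", "satisfied", "impressive", "superb", "delightful", "clean", "spacious", "cozy", "warm", "professional", "exceptional", "magnificent", "stunning", "incredible", "gorgeous", "brilliant", "fabulous", "splendid", "terrific", "awesome", "pleasant", "nice", "good", "happy", "glad", "thankful", "grateful", "polite", "attentive", "efficient", "immaculate", "spotless", "luxurious", "premium", "top", "flawless", "charming", "welcoming", "hospitable", "responsive", "above", "exceeded", "exceeded expectations", "highly recommend", "five stars",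 "5 stars", "will return", "will definitely", "worth", "value", "reasonable", "affordable", "budget", "bargain"]

def pvNegKw : List String := ["terrible", "awful", "horrible", "bad", "worst", "disgusting", "disappointing", "disappointed", "poor", "mediocre", "dirty", "rude", "slow", "unhelpful", "broken", "noisy", "smelly", "uncomfortable", "frustrated", "frustrating", "angry", "overpriced", "unacceptable", "ignored", "waste", "filthy", "unprofessional", "careless", "negligent", "unclean", "subpar", "dreadful", "appalling", "atrocious", "shocking", "miserable", "unpleasant", "annoying", "useless", "incompetent", "lazy", "hostile", "cold", "cramped", "dated", "old", "stained", "moldy", "cockroach", "bug", "insect", "pest", "leak", "flooded", "never again", "avoid", "scam", "rip off", "ripoff", "cheated", "lied", "false", "misleading", "not worth", "regret", "wasted", "below average", "below expectations", "not recommended", "not recommend", "do not stay", "stay away"]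

def pvNeuKw : List String := ["okay", "fine", "average", "decent", "acceptable", "standard", "normal", "expected", "alright", "moderate", "adequate", "fair", "nothing special", "as expected", "typical", "basic", "so-so"]

-- sum(1 for kw in KEYWORDS if kw in words)  (iteration over a Python set: the sum is order-independent)
def pvScoreA (kws : List String) (words : String) : Int :=
  (kws.map (fun kw => if PySem.Str.isIn kw words then (1 : Int) else 0)).sum

-- the rating-only fallback A writes out twice (empty text / no keyword signal)
def pvFallbackA (rating : Option Int) : String :=
  match rating with
  | some r => if 4 ≤ r then "positive" else if r ≤ 2 then "negative" else "neutral"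
  | none => "neutral"

def compute_sentiment (text : String) (rating : Option Int) : String :=
  if text = "" then pvFallbackA rating
  else
    let words := PySem.Str.lower text
    let pos_score := pvScoreA pvPosKw words
    let neg_score := pvScoreA pvNegKw words
    let scores : Int × Int :=
      match rating with
      | some r =>
        if 4 ≤ r then (pos_score + 2, neg_score)
        else if r = 3 then (pos_score, neg_score)
        else if r ≤ 2 then (pos_score, neg_score + 2)
        else (pos_score, neg_score)
      | none => (pos_score, neg_score)
    let pos_score := scores.1
    let neg_score := scores.2
    if pos_score = 0 ∧ neg_score = 0 then
      let neutral_count := pvScoreA pvNeuKw words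
      if 0 < neutral_count then "neutral"
      else pvFallbackA rating
    else if 2 ≤ pos_score ∧ 1 ≤ neg_score then "mixed"
    else if 2 ≤ neg_score ∧ 1 ≤ pos_score then "mixed"
    else if neg_score < pos_score then "positive"
    else if pos_score < neg_score then "negative"
    else "mixed"

-- ===== PORT B =====
-- first-character bucket index: buckets.setdefault(kw[0], []).append(kw)
-- (kw[0] ported as kw.headD ' ': every keyword is nonempty, so the default is never read)
def pvByFirst (kws : List (List Char)) : PySem.Dict Char (List (List Char)) :=
  kws.foldl (fun d kw => d.insert (kw.headD ' ') (d.getD (kw.headD ' ') [] ++ [kw]))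
    PySem.Dict.empty

def pvPosBuckets : PySem.Dict Char (List (List Char)) := pvByFirst (pvPosKw.map String.toList)
def pvNegBuckets : PySem.Dict Char (List (List Char)) := pvByFirst (pvNegKw.map String.toList)
def pvNeuBuckets : PySem.Dict Char (List (List Char)) := pvByFirst (pvNeuKw.map String.toList)

-- inner loop of B: add to the matched set every keyword that starts at the current position
def pvAddMatches (tail : List Char) (kws : List (List Char)) (s : PySem.Set (List Char)) : PySem.Set (List Char) :=
  kws.foldl (fun s kw => if PySem.Chars.startswith tail kw then PySem.Set.add s kw else s) s

-- B's single pass: for i in range(len(words)): look up words[i]'s buckets, grow the matched sets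
def pvScanAll (words : List Char) :
    PySem.Set (List Char) × PySem.Set (List Char) × PySem.Set (List Char) :=
  (List.range words.length).foldl
    (fun st i =>
      let c := words.getD i ' '  -- words[i]; i < len(words), so the default is never read
      (pvAddMatches (words.drop i) (pvPosBuckets.getD c []) st.1,
       pvAddMatches (words.drop i) (pvNegBuckets.getD c []) st.2.1,
       pvAddMatches (words.drop i) (pvNeuBuckets.getD c []) st.2.2))
    (PySem.Set.empty, PySem.Set.empty, PySem.Set.empty)

def pvFallbackB (rating : Option Int) : String :=
  match rating with
  | some r => if 4 ≤ r then "positive" else if r ≤ 2 then "negative" else "neutral"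
  | none => "neutral"

def compute_sentiment_alt (text : String) (rating : Option Int) : String :=
  if text = "" then pvFallbackB rating
  else
    let words := (PySem.Str.lower text).toList
    let st := pvScanAll words
    let biased : Int × Int :=
      match rating with
      | some r =>
        if 4 ≤ r then (PySem.Set.len st.1 + 2, PySem.Set.len st.2.1)
        else if r ≤ 2 then (PySem.Set.len st.1, PySem.Set.len st.2.1 + 2)
        else (PySem.Set.len st.1, PySem.Set.len st.2.1)
      | none => (PySem.Set.len st.1, PySem.Set.len st.2.1)
    let p := biased.1
    let q := biased.2
    if p = 0 ∧ q = 0 then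
      if 0 < PySem.Set.len st.2.2 then "neutral"
      else pvFallbackB rating
    else if (2 ≤ p ∧ 1 ≤ q) ∨ (2 ≤ q ∧ 1 ≤ p) then "mixed"
    else if q < p then "positive"
    else if p < q then "negative"
    else "mixed"

-- ===== PRECONDITION & SPEC =====
def Spec_compute_sentiment (text : String) (rating : Option Int) (out : String) : Prop := out = compute_sentiment_alt text rating
instance (text : String) (rating : Option Int) (out : String) : Decidable (Spec_compute_sentiment text rating out) := by unfold Spec_compute_sentiment; infer_instance

-- ===== CLAIM (what is proved, stated in full; the proofs are below) =====
def Claim_equal_compute_sentiment : Prop := ∀ (text : String) (rating : Option Int), Dom_compute_sentiment text rating → Spec_compute_sentiment text rating (compute_sentiment text rating)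

-- ===== LEMMAS AND PROOFS =====

-- one keyword set's scan, in isolation (proof-side view of pvScanAll's components)
def pvScan (bk : PySem.Dict Char (List (List Char))) (w : List Char) : PySem.Set (List Char) :=
  (List.range w.length).foldl
    (fun s i => pvAddMatches (w.drop i) (bk.getD (w.getD i ' ') []) s) PySem.Set.empty

theorem pvFoldl_prod3 {α β γ ι : Type} (l : List ι) (f1 : α → ι → α) (f2 : β → ι → β)
    (f3 : γ → ι → γ) (a : α) (b : β) (c : γ) :
    l.foldl (fun st i => (f1 st.1 i, f2 st.2.1 i, f3 st.2.2 i)) (a, b, c)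
      = (l.foldl f1 a, l.foldl f2 b, l.foldl f3 c) := by
  induction l generalizing a b c with
  | nil => rfl
  | cons x xs ih => simp [List.foldl_cons, ih]

theorem pvScanAll_eq (w : List Char) :
    pvScanAll w = (pvScan pvPosBuckets w, pvScan pvNegBuckets w, pvScan pvNeuBuckets w) := by
  unfold pvScanAll pvScan
  exact pvFoldl_prod3 (List.range w.length)
    (fun s i => pvAddMatches (w.drop i) (pvPosBuckets.getD (w.getD i ' ') []) s)
    (fun s i => pvAddMatches (w.drop i) (pvNegBuckets.getD (w.getD i ' ') []) s)
    (fun s i => pvAddMatches (w.drop i) (pvNeuBuckets.getD (w.getD i ' ') []) s)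
    PySem.Set.empty PySem.Set.empty PySem.Set.empty

theorem pvMem_addMatches (t : List Char) (kws : List (List Char)) (s : PySem.Set (List Char))
    (y : List Char) :
    y ∈ pvAddMatches t kws s ↔ y ∈ s ∨ (y ∈ kws ∧ PySem.Chars.startswith t y = true) := by
  induction kws generalizing s with
  | nil => simp [pvAddMatches]
  | cons k ks ih =>
    unfold pvAddMatches at *
    by_cases hk : PySem.Chars.startswith t k = true
    · simp only [List.foldl_cons, if_pos hk, ih, PySem.Set.mem_add]
      constructor
      · rintro ((h | rfl) | ⟨h1, h2⟩)
        · exact Or.inl h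
        · exact Or.inr ⟨List.mem_cons_self .., hk⟩
        · exact Or.inr ⟨List.mem_cons_of_mem _ h1, h2⟩
      · rintro (h | ⟨h1, h2⟩)
        · exact Or.inl (Or.inl h)
        · rcases List.mem_cons.mp h1 with rfl | h1
          · exact Or.inl (Or.inr rfl)
          · exact Or.inr ⟨h1, h2⟩
    · simp only [List.foldl_cons, if_neg hk, ih]
      constructor
      · rintro (h | ⟨h1, h2⟩)
        · exact Or.inl h
        · exact Or.inr ⟨List.mem_cons_of_mem _ h1, h2⟩
      · rintro (h | ⟨h1, h2⟩)
        · exact Or.inl h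
        · rcases List.mem_cons.mp h1 with rfl | h1
          · exact absurd h2 hk
          · exact Or.inr ⟨h1, h2⟩

theorem pvNodup_addMatches (t : List Char) (kws : List (List Char)) (s : PySem.Set (List Char))
    (hs : s.Nodup) : (pvAddMatches t kws s).Nodup := by
  induction kws generalizing s with
  | nil => exact hs
  | cons k ks ih =>
    unfold pvAddMatches at *
    simp only [List.foldl_cons]
    split
    · exact ih _ (PySem.Set.nodup_add s k hs)
    · exact ih _ hs

theorem pvMem_scan (bk : PySem.Dict Char (List (List Char))) (w : List Char) (y : List Char) :
    y ∈ pvScan bk w ↔ ∃ i < w.length,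
      y ∈ bk.getD (w.getD i ' ') [] ∧ PySem.Chars.startswith (w.drop i) y = true := by
  have gen : ∀ (l : List ℕ) (s : PySem.Set (List Char)),
      y ∈ l.foldl (fun s i => pvAddMatches (w.drop i) (bk.getD (w.getD i ' ') []) s) s
        ↔ y ∈ s ∨ ∃ i ∈ l, y ∈ bk.getD (w.getD i ' ') [] ∧ PySem.Chars.startswith (w.drop i) y = true := by
    intro l
    induction l with
    | nil => simp
    | cons x xs ih =>
      intro s
      simp only [List.foldl_cons, ih, pvMem_addMatches, List.mem_cons]
      constructor
      · rintro ((h | ⟨h1, h2⟩) | ⟨i, hi, h⟩)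
        · exact Or.inl h
        · exact Or.inr ⟨x, Or.inl rfl, h1, h2⟩
        · exact Or.inr ⟨i, Or.inr hi, h⟩
      · rintro (h | ⟨i, (rfl | hi), h⟩)
        · exact Or.inl (Or.inl h)
        · exact Or.inl (Or.inr h)
        · exact Or.inr ⟨i, hi, h⟩
  unfold pvScan
  rw [gen]
  simp [PySem.Set.empty, List.mem_range]

theorem pvNodup_scan (bk : PySem.Dict Char (List (List Char))) (w : List Char) :
    (pvScan bk w).Nodup := by
  have gen : ∀ (l : List ℕ) (s : PySem.Set (List Char)), s.Nodup →
      (l.foldl (fun s i => pvAddMatches (w.drop i) (bk.getD (w.getD i ' ') []) s) s).Nodup := by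
    intro l
    induction l with
    | nil => exact fun s hs => hs
    | cons x xs ih => exact fun s hs => ih _ (pvNodup_addMatches _ _ _ hs)
  exact gen _ _ List.nodup_nil

theorem pvGetD_byFirst (kws : List (List Char)) (c : Char) :
    (pvByFirst kws).getD c [] = kws.filter (fun kw => kw.headD ' ' == c) := by
  have gen : ∀ (l : List (List Char)) (d : PySem.Dict Char (List (List Char))),
      (l.foldl (fun d kw => d.insert (kw.headD ' ') (d.getD (kw.headD ' ') [] ++ [kw])) d).getD c []
        = d.getD c [] ++ l.filter (fun kw => kw.headD ' ' == c) := by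
    intro l
    induction l with
    | nil => simp
    | cons kw rest ih =>
      intro d
      simp only [List.foldl_cons, ih, List.filter_cons, PySem.Dict.getD_insert]
      by_cases hc : c = kw.headD ' '
      · simp [hc]
      · rw [if_neg hc, if_neg (fun h => hc (beq_iff_eq.mp h).symm)]
  rw [pvByFirst, gen, PySem.Dict.getD_empty, List.nil_append]

theorem pvScore_eq (kws : List String) (hk : (kws.map String.toList).Nodup)
    (hne : ∀ kw ∈ kws.map String.toList, kw ≠ []) (words : String) :
    PySem.Set.len (pvScan (pvByFirst (kws.map String.toList)) words.toList)
      = pvScoreA kws words := by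
  unfold pvScoreA PySem.Set.len
  rw [PySem.List.sum_map_ite_one_zero]
  congr 1
  have hmem : ∀ y, y ∈ pvScan (pvByFirst (kws.map String.toList)) words.toList
      ↔ y ∈ (kws.map String.toList).filter (fun kw => PySem.Chars.isIn kw words.toList) := by
    intro y
    rw [pvMem_scan, List.mem_filter]
    constructor
    · rintro ⟨i, _, hbk, hpre⟩
      rw [pvGetD_byFirst, List.mem_filter] at hbk
      refine ⟨hbk.1, ?_⟩
      rw [← PySem.Chars.exists_prefix_drop_iff_isIn]
      exact ⟨i, (PySem.Chars.startswith_iff ..).mp hpre⟩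
    · rintro ⟨hy, hin⟩
      rcases (PySem.Chars.exists_prefix_drop_iff_isIn ..).mpr hin with ⟨j, hj⟩
      have hyne : y ≠ [] := hne y hy
      have hjl : j < words.toList.length := by
        by_contra hge
        have hnil : words.toList.drop j = [] := List.drop_eq_nil_iff.mpr (le_of_not_gt hge)
        exact hyne (List.prefix_nil.mp (hnil ▸ hj))
      refine ⟨j, hjl, ?_, (PySem.Chars.startswith_iff ..).mpr hj⟩
      rw [pvGetD_byFirst, List.mem_filter]
      refine ⟨hy, beq_iff_eq.mpr ?_⟩
      rcases hj with ⟨t, ht⟩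
      have h1 : y.headD ' ' = (words.toList.drop j).headD ' ' := by
        rw [← ht]
        cases y with
        | nil => exact absurd rfl hyne
        | cons a ys => rfl
      rw [h1, List.headD_eq_head?_getD, List.head?_drop, List.getD_eq_getElem?_getD]
  have hperm : (pvScan (pvByFirst (kws.map String.toList)) words.toList).Perm
      ((kws.map String.toList).filter (fun kw => PySem.Chars.isIn kw words.toList)) :=
    (List.perm_ext_iff_of_nodup (pvNodup_scan _ _) (hk.filter _)).mpr hmem
  rw [hperm.length_eq, ← List.countP_eq_length_filter, List.countP_map]
  apply List.countP_congr
  intro kw _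
  simp [Function.comp, PySem.Str.isIn_eq]

theorem pvNodupPos : (pvPosKw.map String.toList).Nodup := by decide
theorem pvNodupNeg : (pvNegKw.map String.toList).Nodup := by decide
theorem pvNodupNeu : (pvNeuKw.map String.toList).Nodup := by decide
theorem pvNePos : ∀ kw ∈ pvPosKw.map String.toList, kw ≠ [] := by decide
theorem pvNeNeg : ∀ kw ∈ pvNegKw.map String.toList, kw ≠ [] := by decide
theorem pvNeNeu : ∀ kw ∈ pvNeuKw.map String.toList, kw ≠ [] := by decide

-- ===== VERDICT (by name: the statement is the Claim_ definition above) =====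
theorem compute_sentiment_spec : Claim_equal_compute_sentiment := by
  intro text rating _
  unfold Spec_compute_sentiment compute_sentiment compute_sentiment_alt
  by_cases htext : text = ""
  · rw [if_pos htext, if_pos htext]
    rfl
  · rw [if_neg htext, if_neg htext]
    simp only [pvScanAll_eq, pvPosBuckets, pvNegBuckets, pvNeuBuckets,
      pvScore_eq pvPosKw pvNodupPos pvNePos,
      pvScore_eq pvNegKw pvNodupNeg pvNeNeg,
      pvScore_eq pvNeuKw pvNodupNeu pvNeNeu]
    generalize pvScoreA pvPosKw (PySem.Str.lower text) = p
    generalize pvScoreA pvNegKw (PySem.Str.lower text) = q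
    generalize pvScoreA pvNeuKw (PySem.Str.lower text) = nc
    cases rating with
    | none =>
      dsimp only
      split_ifs <;> first | rfl | omega
    | some r =>
      unfold pvFallbackA pvFallbackB
      dsimp only
      split_ifs <;> first | rfl | omega
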